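-- pv_equiv track=rewrite | github.com/liangzp/DP-Streaming-SCO | algo.py | get_noise_idx
-- ===== SOURCE A (Python) =====
-- def get_noise_idx(t):
--     # in each round t, we need to know the indices of nodes we need to get the partial sum
--     # these indices will allow use the get the corresponding fixed noises of thoese nodes
--     # for example, when t=7, as need node A4+A6+A7,
--     # where A4 = g1+g2+g3+g4 + noise, A6 = g5 + g6 + noise, A7 = g7 + noise
--     # so we need to get the noise from A4, A6, A7. This function will return [4,6,7] for us.
--     # The idea is like, we decompose a number 7 into 4+2+1, the index for node would be 4, 4+2, 4+2+1
--     bin_t = format(t, 'b')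
--     node_idx = []
--     for i in range(len(bin_t)):
--         if bin_t[i] == '1':
--             idx = '1' + '0' * (len(bin_t) - i - 1)
--             if len(node_idx) == 0:
--                 node_idx.append(int(idx, 2))
--             else:
--                 node_idx.append(node_idx[-1] + int(idx, 2))
--     return node_idx
-- ===== SOURCE B (Python) =====
-- def get_noise_idx(t):
--     # Each node index is obtained directly by clearing the low bits of |t|
--     # below the set bit, instead of threading a running prefix sum.
--     n = abs(t)
--     return [(n >> p) << p for p in reversed(range(n.bit_length())) if (n >> p) & 1]
-- ===== Notes on version B (the rewrite author's own statement) =====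
-- stated objective: simpler
-- what changed: Replaces the binary-string scan with a running prefix-sum accumulator by a one-line comprehension over bit positions that computes each node index independently as (n >> p) << p (clearing the low bits), with no string formatting and no accumulator.
import Mathlib
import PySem

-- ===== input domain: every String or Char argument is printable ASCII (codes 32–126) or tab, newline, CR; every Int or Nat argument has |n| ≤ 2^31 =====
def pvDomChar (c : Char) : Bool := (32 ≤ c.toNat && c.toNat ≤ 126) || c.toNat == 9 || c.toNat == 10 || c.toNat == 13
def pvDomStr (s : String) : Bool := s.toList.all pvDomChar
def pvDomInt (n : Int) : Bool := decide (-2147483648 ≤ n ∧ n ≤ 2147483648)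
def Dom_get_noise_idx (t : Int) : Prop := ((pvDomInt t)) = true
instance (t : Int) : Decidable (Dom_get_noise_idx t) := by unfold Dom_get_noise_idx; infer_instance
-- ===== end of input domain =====

-- B replaces A's binary-string scan with a running prefix-sum accumulator by a comprehension
-- that derives each node index independently by bit masking (objective: simpler).

-- ===== PORT A =====

-- format(n, 'b') for n ≥ 0 produces these digit characters, MSB first (empty only for n = 0)
def natBits (n : Nat) : List Char :=
  if h : n = 0 then []
  else natBits (n / 2) ++ [if n % 2 = 1 then '1' else '0']
decreasing_by exact Nat.div_lt_self (Nat.pos_of_ne_zero h) (by omega)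

-- format(n, 'b') for n ≥ 0 (format(0,'b') = '0')
def binChars (n : Nat) : List Char := if n = 0 then ['0'] else natBits n

-- int(s, 2) for a binary-digit string s
def intOfBin (s : List Char) : Nat :=
  s.foldl (fun a c => 2 * a + (if c = '1' then 1 else 0)) 0

-- node_idx[-1] (the loop only reads it when node_idx is nonempty)
def lastVal (l : List Int) : Int := (PySem.List.pyGet? l (-1)).getD 0

-- the 'for i in range(len(bin_t))' loop; len(bin_t) - i - 1 = length of the remaining suffix
def aLoop : List Char → List Int → List Int
  | [], node_idx => node_idx
  | c :: rest, node_idx =>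
    if c = '1' then
      let idx : Int := (intOfBin ('1' :: List.replicate rest.length '0') : Nat)
      aLoop rest (node_idx ++ [if node_idx = [] then idx else lastVal node_idx + idx])
    else aLoop rest node_idx

def get_noise_idx (t : Int) : List Int :=
  let bin_t : List Char := if t < 0 then '-' :: binChars t.natAbs else binChars t.natAbs
  aLoop bin_t []

-- ===== PORT B =====

-- n.bit_length()
def bitLen (n : Nat) : Nat :=
  if h : n = 0 then 0 else bitLen (n / 2) + 1
decreasing_by exact Nat.div_lt_self (Nat.pos_of_ne_zero h) (by omega)

def get_noise_idx_alt (t : Int) : List Int :=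
  let n := t.natAbs
  ((List.range (bitLen n)).reverse.filter (fun p => (n >>> p) &&& 1 == 1)).map
    (fun p => (((n >>> p) <<< p : Nat) : Int))

-- ===== PRECONDITION & SPEC =====
def Spec_get_noise_idx (t : Int) (out : List Int) : Prop := out = get_noise_idx_alt t
instance (t : Int) (out : List Int) : Decidable (Spec_get_noise_idx t out) := by unfold Spec_get_noise_idx; infer_instance

-- ===== CLAIM (what is proved, stated in full; the proofs are below) =====
def Claim_equal_get_noise_idx : Prop := ∀ (t : Int), Dom_get_noise_idx t → Spec_get_noise_idx t (get_noise_idx t)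

-- ===== LEMMAS AND PROOFS =====

-- B's result for |t| = n, as a function of the range bound
def masks (n L : Nat) : List Int :=
  ((List.range L).reverse.filter (fun p => (n >>> p) &&& 1 == 1)).map
    (fun p => (((n >>> p) <<< p : Nat) : Int))

lemma lastVal_nil : lastVal [] = 0 := by decide

lemma lastVal_append (l : List Int) (v : Int) : lastVal (l ++ [v]) = v := by
  simp [lastVal, PySem.List.pyGet?_neg_one]

lemma intOfBin_pow (m : Nat) : intOfBin ('1' :: List.replicate m '0') = 2 ^ m := by
  have h : ∀ (m a : Nat), (List.replicate m '0').foldl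
      (fun a c => 2 * a + (if c = '1' then 1 else 0)) a = a * 2 ^ m := by
    intro m
    induction m with
    | zero => intro a; simp
    | succ k ih =>
      intro a
      simp only [List.replicate_succ, List.foldl_cons, ih]
      have : (if ('0' : Char) = '1' then 1 else 0) = 0 := by decide
      rw [this]; ring
  simp [intOfBin, h]

lemma shift_step (n m : Nat) :
    ((n >>> (m + 1)) <<< (m + 1) : Nat) + (if (n >>> m) &&& 1 == 1 then 2 ^ m else 0)
      = (n >>> m) <<< m := by
  rw [Nat.shiftRight_succ, Nat.shiftLeft_eq, Nat.shiftLeft_eq, Nat.and_one_is_mod]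
  have hp : (2 : Nat) ^ (m + 1) = 2 ^ m * 2 := by ring
  rw [hp]
  generalize n >>> m = a
  by_cases hb : a % 2 = 1
  · obtain ⟨q, rfl⟩ : ∃ q, a = 2 * q + 1 := ⟨a / 2, by omega⟩
    have hq : (2 * q + 1) / 2 = q := by omega
    simp [hb, hq]; ring
  · obtain ⟨q, rfl⟩ : ∃ q, a = 2 * q := ⟨a / 2, by omega⟩
    have h0 : (2 * q) % 2 = 0 := by omega
    have hq : (2 * q) / 2 = q := by omega
    simp [h0, hq]; ring

lemma masks_succ (n m : Nat) :
    masks n (m + 1) =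
      (if (n >>> m) &&& 1 == 1 then [(((n >>> m) <<< m : Nat) : Int)] else []) ++ masks n m := by
  rw [masks, masks, List.range_succ, List.reverse_append]
  by_cases h : (n >>> m) % 2 = 1 <;>
    simp [Nat.and_one_is_mod, h, List.map_reverse]

lemma loop_spec (n : Nat) : ∀ (L : Nat) (pre : List Int),
    lastVal pre = (((n >>> L) <<< L : Nat) : Int) →
    aLoop ((List.range L).reverse.map (fun p => if (n >>> p) &&& 1 == 1 then '1' else '0')) pre
      = pre ++ masks n L := by
  intro L
  induction L with
  | zero => intro pre _; simp [aLoop, masks]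
  | succ m ih =>
    intro pre h
    rw [List.range_succ, List.reverse_append]
    simp only [List.reverse_singleton, List.singleton_append, List.map_cons]
    by_cases hb : ((n >>> m) &&& 1 == 1) = true
    · rw [if_pos hb]
      simp only [aLoop]
      simp only [List.length_map, List.length_reverse, List.length_range, intOfBin_pow]
      have hv : (if pre = [] then ((2 ^ m : Nat) : Int) else lastVal pre + ((2 ^ m : Nat) : Int))
          = lastVal pre + ((2 ^ m : Nat) : Int) := by
        split_ifs with hpre
        · subst hpre; rw [lastVal_nil]; ring
        · rfl
      rw [hv]
      have hs : ((n >>> (m + 1)) <<< (m + 1) : Nat) + 2 ^ m = (n >>> m) <<< m := by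
        have := shift_step n m; rw [if_pos hb] at this; exact this
      have hacc : lastVal (pre ++ [lastVal pre + ((2 ^ m : Nat) : Int)])
          = (((n >>> m) <<< m : Nat) : Int) := by
        rw [lastVal_append, h, ← hs]; push_cast; ring
      rw [ih _ hacc, masks_succ, if_pos hb]
      have : lastVal pre + ((2 ^ m : Nat) : Int) = (((n >>> m) <<< m : Nat) : Int) := by
        rw [h, ← hs]; push_cast; ring
      rw [this]; simp
    · rw [if_neg hb]
      simp only [aLoop]
      rw [if_neg (by decide : ¬ ('0' : Char) = '1')]
      have hs : ((n >>> (m + 1)) <<< (m + 1) : Nat) = (n >>> m) <<< m := by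
        have := shift_step n m; rw [if_neg hb] at this; omega
      rw [ih pre (by rw [h, hs]), masks_succ, if_neg hb]
      simp

lemma natBits_eq (n : Nat) :
    natBits n = (List.range (bitLen n)).reverse.map
      (fun p => if (n >>> p) &&& 1 == 1 then '1' else '0') := by
  induction n using Nat.strong_induction_on with
  | _ n ih =>
    by_cases h0 : n = 0
    · subst h0; rw [natBits, bitLen]; simp
    · rw [natBits, dif_neg h0, bitLen, dif_neg h0,
        ih (n / 2) (Nat.div_lt_self (Nat.pos_of_ne_zero h0) (by omega))]
      rw [List.range_succ_eq_map, List.reverse_cons]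
      simp only [List.map_append, List.map_reverse, List.map_map]
      congr 1
      · congr 1
        apply List.map_congr_left
        intro a _
        simp [Function.comp, Nat.shiftRight_succ_inside]
      · simp only [List.map_cons, List.map_nil, Nat.shiftRight_zero, Nat.and_one_is_mod]
        by_cases h : n % 2 = 1 <;> simp [h]

lemma lt_two_pow_bitLen (n : Nat) : n < 2 ^ bitLen n := by
  induction n using Nat.strong_induction_on with
  | _ n ih =>
    by_cases h0 : n = 0
    · subst h0; rw [bitLen]; simp
    · rw [bitLen, dif_neg h0]
      have hlt := ih (n / 2) (Nat.div_lt_self (Nat.pos_of_ne_zero h0) (by omega))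
      have h2 : (2 : Nat) ^ (bitLen (n / 2) + 1) = 2 * 2 ^ bitLen (n / 2) := by ring
      rw [h2]; omega

lemma key_eq (n : Nat) : aLoop (binChars n) [] = masks n (bitLen n) := by
  by_cases h0 : n = 0
  · subst h0
    rw [binChars]
    simp [aLoop, masks, bitLen]
  · rw [binChars, if_neg h0, natBits_eq]
    have hz : lastVal ([] : List Int) = (((n >>> bitLen n) <<< bitLen n : Nat) : Int) := by
      have : n >>> bitLen n = 0 := by
        rw [Nat.shiftRight_eq_div_pow]
        exact Nat.div_eq_of_lt (lt_two_pow_bitLen n)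
      rw [lastVal_nil, this]; simp
    rw [loop_spec n (bitLen n) [] hz]; simp

-- ===== VERDICT (by name: the statement is the Claim_ definition above) =====
theorem get_noise_idx_spec : Claim_equal_get_noise_idx := by
  intro t _
  unfold Spec_get_noise_idx get_noise_idx get_noise_idx_alt
  by_cases ht : t < 0
  · rw [if_pos ht]
    show aLoop ('-' :: binChars t.natAbs) [] = masks t.natAbs (bitLen t.natAbs)
    simp only [aLoop]
    rw [if_neg (by decide : ¬ ('-' : Char) = '1')]
    exact key_eq t.natAbs
  · rw [if_neg ht]
    exact key_eq t.natAbs
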